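-- pv_equiv track=rewrite | github.com/davidiach/erdos97 | scripts/check_n9_base_apex_escape_budget.py | canonical_deficit_placement
-- ===== SOURCE A (Python) =====
-- from typing import Any, Iterable, Sequence
--
-- def transform_base_index(
--     n: int,
--     index: int,
--     cyclic_length: int,
--     *,
--     rotation: int,
--     reflected: bool,
-- ) -> int:
--     """Transform a cyclic base index under a dihedral relabeling."""
--
--     if reflected:
--         return (rotation - index - cyclic_length) % n
--     return (index + rotation) % n
--
-- def canonical_deficit_placement(
--     n: int,
--     spoiled_length2: Iterable[int],
--     spoiled_length3: Iterable[int],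
-- ) -> tuple[tuple[int, ...], tuple[int, ...]]:
--     """Return a dihedral canonical key for spoiled length-2/length-3 bases."""
--
--     spoiled2 = tuple(spoiled_length2)
--     spoiled3 = tuple(spoiled_length3)
--     keys = []
--     for rotation in range(n):
--         for reflected in (False, True):
--             keys.append(
--                 (
--                     tuple(
--                         sorted(
--                             transform_base_index(
--                                 n,
--                                 index,
--                                 2,
--                                 rotation=rotation,
--                                 reflected=reflected,
--                             )
--                             for index in spoiled2
--                         )
--                     ),
--                     tuple(
--                         sorted(
--                             transform_base_index(
--                                 n,
--                                 index,
--                                 3,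
--                                 rotation=rotation,
--                                 reflected=reflected,
--                             )
--                             for index in spoiled3
--                         )
--                     ),
--                 )
--             )
--     return min(keys)
-- ===== SOURCE B (Python) =====
-- def canonical_deficit_placement(n, spoiled_length2, spoiled_length3):
--     # Pre-sort the residues once; every rotation is then a cyclic split (O(a))
--     # instead of a fresh sort; reflections reuse the same shift on a second
--     # pre-sorted list.
--     m2 = sorted(x % n for x in spoiled_length2)
--     m3 = sorted(x % n for x in spoiled_length3)
--     t2 = sorted((-x - 2) % n for x in spoiled_length2)
--     t3 = sorted((-x - 3) % n for x in spoiled_length3)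
--
--     def rot(s, r):
--         cut = n - r
--         return tuple(v - cut for v in s if v >= cut) + tuple(v + r for v in s if v < cut)
--
--     return min(
--         key
--         for r in range(n)
--         for key in ((rot(m2, r), rot(m3, r)), (rot(t2, r), rot(t3, r)))
--     )
-- ===== Notes on version B (the rewrite author's own statement) =====
-- stated objective: faster
-- what changed: B pre-sorts the two residue lists (and their reflected counterparts) once and produces each rotation's sorted key by an O(a) cyclic split-and-shift of the pre-sorted list, instead of re-sorting both lists inside every rotation/reflection iteration as A does.
import Mathlib
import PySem

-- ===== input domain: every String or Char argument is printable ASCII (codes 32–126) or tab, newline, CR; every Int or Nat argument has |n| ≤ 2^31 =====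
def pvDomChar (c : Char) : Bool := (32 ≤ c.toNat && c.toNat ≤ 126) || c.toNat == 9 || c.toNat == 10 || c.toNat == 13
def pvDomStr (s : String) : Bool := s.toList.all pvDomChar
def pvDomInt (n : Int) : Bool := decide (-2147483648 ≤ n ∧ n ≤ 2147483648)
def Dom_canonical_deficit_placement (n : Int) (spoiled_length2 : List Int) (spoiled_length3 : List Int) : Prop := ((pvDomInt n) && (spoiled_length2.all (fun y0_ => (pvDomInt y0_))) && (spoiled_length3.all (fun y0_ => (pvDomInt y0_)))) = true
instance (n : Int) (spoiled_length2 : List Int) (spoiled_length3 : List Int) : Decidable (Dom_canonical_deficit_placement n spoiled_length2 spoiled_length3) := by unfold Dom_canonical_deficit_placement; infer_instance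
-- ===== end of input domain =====

-- B pre-sorts the residue lists once and obtains each rotation's sorted key by a cyclic
-- split of the pre-sorted list instead of re-sorting inside the loop (objective: faster).

-- shared helper: Python's '<' on int tuples (lexicographic); PySem has no tuple order
def pvLexLt : List Int → List Int → Bool
  | [], [] => false
  | [], _ :: _ => true
  | _ :: _, [] => false
  | a :: as, b :: bs => a < b || (a == b && pvLexLt as bs)

-- shared helper: Python's '<' on pairs of int tuples
def pvPairLt (a b : List Int × List Int) : Bool :=
  pvLexLt a.1 b.1 || (a.1 == b.1 && pvLexLt a.2 b.2)

-- shared helper: Python's min over a non-empty list (keeps the first minimal element)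
def pvMin (k : List Int × List Int) (t : List (List Int × List Int)) : List Int × List Int :=
  t.foldl (fun best c => if pvPairLt c best then c else best) k

-- ===== PORT A =====
def transform_base_index (n index cyclic_length rotation : Int) (reflected : Bool) : Int :=
  if reflected then PySem.Int.mod (rotation - index - cyclic_length) n
  else PySem.Int.mod (index + rotation) n

def canonical_deficit_placement (n : Int) (spoiled_length2 : List Int) (spoiled_length3 : List Int) : List Int × List Int :=
  let keys := (PySem.List.pyRange 0 n 1).foldl (fun acc rotation =>
    ([false, true]).foldl (fun acc2 reflected =>
      acc2 ++ [(PySem.List.sorted (spoiled_length2.map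
                  (fun index => transform_base_index n index 2 rotation reflected)) (fun x => x) false,
                PySem.List.sorted (spoiled_length3.map
                  (fun index => transform_base_index n index 3 rotation reflected)) (fun x => x) false)]) acc) []
  match keys with
  | [] => ([], [])   -- Python raises ValueError here (n ≤ 0); excluded by Pre_
  | k :: t => pvMin k t

-- ===== PORT B =====
def pvRot (n r : Int) (s : List Int) : List Int :=
  let cut := n - r
  (s.filter (fun v => cut ≤ v)).map (fun v => v - cut) ++
    (s.filter (fun v => v < cut)).map (fun v => v + r)

def canonical_deficit_placement_alt (n : Int) (spoiled_length2 : List Int) (spoiled_length3 : List Int) : List Int × List Int :=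
  let m2 := PySem.List.sorted (spoiled_length2.map (fun x => PySem.Int.mod x n)) (fun x => x) false
  let m3 := PySem.List.sorted (spoiled_length3.map (fun x => PySem.Int.mod x n)) (fun x => x) false
  let t2 := PySem.List.sorted (spoiled_length2.map (fun x => PySem.Int.mod (-x - 2) n)) (fun x => x) false
  let t3 := PySem.List.sorted (spoiled_length3.map (fun x => PySem.Int.mod (-x - 3) n)) (fun x => x) false
  let keys := (PySem.List.pyRange 0 n 1).foldl (fun acc r =>
    acc ++ [(pvRot n r m2, pvRot n r m3), (pvRot n r t2, pvRot n r t3)]) []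
  match keys with
  | [] => ([], [])   -- Python raises ValueError here (n ≤ 0); excluded by Pre_
  | k :: t => pvMin k t

-- ===== PRECONDITION & SPEC =====
-- Pre_ excludes exactly n ≤ 0, where range(n) is empty and Python's min([]) raises ValueError.
def Pre_canonical_deficit_placement (n : Int) (spoiled_length2 : List Int) (spoiled_length3 : List Int) : Prop := 1 ≤ n
instance (n : Int) (spoiled_length2 : List Int) (spoiled_length3 : List Int) : Decidable (Pre_canonical_deficit_placement n spoiled_length2 spoiled_length3) := by unfold Pre_canonical_deficit_placement; infer_instance
def pvWitness_canonical_deficit_placement : Int × List Int × List Int := (3, [0, 1], [2])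

def Spec_canonical_deficit_placement (n : Int) (spoiled_length2 : List Int) (spoiled_length3 : List Int) (out : List Int × List Int) : Prop := out = canonical_deficit_placement_alt n spoiled_length2 spoiled_length3
instance (n : Int) (spoiled_length2 : List Int) (spoiled_length3 : List Int) (out : List Int × List Int) : Decidable (Spec_canonical_deficit_placement n spoiled_length2 spoiled_length3 out) := by unfold Spec_canonical_deficit_placement; infer_instance

-- ===== CLAIM (what is proved, stated in full; the proofs are below) =====
def Claim_equal_canonical_deficit_placement : Prop := ∀ (n : Int) (spoiled_length2 : List Int) (spoiled_length3 : List Int), Dom_canonical_deficit_placement n spoiled_length2 spoiled_length3 → Pre_canonical_deficit_placement n spoiled_length2 spoiled_length3 → Spec_canonical_deficit_placement n spoiled_length2 spoiled_length3 (canonical_deficit_placement n spoiled_length2 spoiled_length3)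

-- ===== LEMMAS AND PROOFS =====

-- shifting a residue by r ∈ [0, n) either stays in place (+ r) or wraps (- (n - r))
theorem pv_mod_shift (n r x : Int) (hn : 0 < n) (hr : 0 ≤ r) (hrn : r < n) :
    PySem.Int.mod (x + r) n =
      (if n - r ≤ PySem.Int.mod x n then PySem.Int.mod x n - (n - r) else PySem.Int.mod x n + r) := by
  rw [PySem.Int.mod_eq_emod_of_pos hn, PySem.Int.mod_eq_emod_of_pos hn]
  have h0 : 0 ≤ x % n := Int.emod_nonneg x (by omega)
  have h1 : x % n < n := Int.emod_lt_of_pos x hn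
  rw [← Int.emod_add_emod x n r]
  by_cases hc : n - r ≤ x % n
  · rw [if_pos hc, ← Int.sub_emod_right (x % n + r) n,
      Int.emod_eq_of_lt (by omega) (by omega)]
    ring
  · rw [if_neg hc, Int.emod_eq_of_lt (by omega) (by omega)]

theorem pv_modmod (n a : Int) (hn : 0 < n) :
    PySem.Int.mod (PySem.Int.mod a n) n = PySem.Int.mod a n := by
  rw [PySem.Int.mod_eq_emod_of_pos hn, PySem.Int.mod_eq_emod_of_pos hn, Int.emod_emod]

-- the key rotation lemma: sorting the shifted residues = cyclic split of the sorted residues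
theorem pvRot_sorted (n r : Int) (hn : 0 < n) (hr : 0 ≤ r) (hrn : r < n) (l : List Int) :
    PySem.List.sorted (l.map (fun x => PySem.Int.mod (x + r) n)) (fun x => x) false =
      pvRot n r (PySem.List.sorted (l.map (fun x => PySem.Int.mod x n)) (fun x => x) false) := by
  set s' := PySem.List.sorted (l.map (fun x => PySem.Int.mod x n)) (fun x => x) false with hs'
  have hmem : ∀ v ∈ s', 0 ≤ v ∧ v < n := by
    intro v hv
    rw [hs', PySem.List.mem_sorted] at hv
    obtain ⟨x, _, rfl⟩ := List.mem_map.mp hv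
    exact ⟨PySem.Int.mod_nonneg x hn, PySem.Int.mod_lt x hn⟩
  have hmap : l.map (fun x => PySem.Int.mod (x + r) n)
      = (l.map (fun x => PySem.Int.mod x n)).map
          (fun v => if n - r ≤ v then v - (n - r) else v + r) := by
    rw [List.map_map]
    exact List.map_congr_left (fun x _ => pv_mod_shift n r x hn hr hrn)
  have e1 : (s'.filter (fun v => n - r ≤ v)).map (fun v => v - (n - r))
      = (s'.filter (fun v => n - r ≤ v)).map (fun v => if n - r ≤ v then v - (n - r) else v + r) := by
    apply List.map_congr_left
    intro v hv
    have hc := (List.mem_filter.mp hv).2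
    rw [if_pos (by simpa using hc)]
  have e2 : (s'.filter (fun v => v < n - r)).map (fun v => v + r)
      = (s'.filter (fun v => v < n - r)).map (fun v => if n - r ≤ v then v - (n - r) else v + r) := by
    apply List.map_congr_left
    intro v hv
    have hc := (List.mem_filter.mp hv).2
    simp only [decide_eq_true_eq] at hc
    rw [if_neg (by omega)]
  have efilter : s'.filter (fun v => v < n - r) = s'.filter (fun v => !(decide (n - r ≤ v))) := by
    apply List.filter_congr
    intro v _
    by_cases hc : n - r ≤ v
    · simp [hc, show ¬ v < n - r by omega]
    · simp [hc, show v < n - r by omega]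
  have hperm : (pvRot n r s').Perm (l.map (fun x => PySem.Int.mod (x + r) n)) := by
    rw [hmap]
    simp only [pvRot]
    rw [e1, e2, efilter, ← List.map_append]
    exact ((List.filter_append_perm _ s').map _).trans
      ((PySem.List.sorted_perm (l.map (fun x => PySem.Int.mod x n)) (fun x => x) false).map _)
  have hpw : (pvRot n r s').Pairwise (· ≤ ·) := by
    have hpws' : s'.Pairwise (· ≤ ·) := PySem.List.sorted_pairwise _ _
    simp only [pvRot]
    apply List.pairwise_append.mpr
    refine ⟨(hpws'.filter _).map _ (fun a b hab => by omega),
            (hpws'.filter _).map _ (fun a b hab => by omega), ?_⟩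
    intro a ha b hb
    obtain ⟨v, hv, rfl⟩ := List.mem_map.mp ha
    obtain ⟨w, hw, rfl⟩ := List.mem_map.mp hb
    have hvf := List.mem_filter.mp hv
    have hwf := List.mem_filter.mp hw
    have hv2 := hmem v hvf.1
    have hw2 := hmem w hwf.1
    omega
  have hperm1 : (PySem.List.sorted (l.map (fun x => PySem.Int.mod (x + r) n)) (fun x => x) false).Perm
      (pvRot n r s') :=
    ((PySem.List.sorted_perm _ _ _).trans hperm.symm)
  exact PySem.List.eq_of_perm_of_pairwise_le_of_injective (fun x => x) (fun a b hab => hab)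
    hperm1 (PySem.List.sorted_pairwise _ _) hpw

-- the reflected key at rotation r is the same cyclic split of the pre-sorted reflected residues
theorem pvRefl_sorted (n r L : Int) (hn : 0 < n) (hr : 0 ≤ r) (hrn : r < n) (s : List Int) :
    PySem.List.sorted (s.map (fun i => PySem.Int.mod (r - i - L) n)) (fun x => x) false =
      pvRot n r (PySem.List.sorted (s.map (fun i => PySem.Int.mod (-i - L) n)) (fun x => x) false) := by
  have h1 : s.map (fun i => PySem.Int.mod (r - i - L) n)
      = (s.map (fun i => PySem.Int.mod (-i - L) n)).map (fun x => PySem.Int.mod (x + r) n) := by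
    rw [List.map_map]
    apply List.map_congr_left
    intro i _
    simp only [Function.comp]
    rw [PySem.Int.mod_eq_emod_of_pos hn, PySem.Int.mod_eq_emod_of_pos hn,
      PySem.Int.mod_eq_emod_of_pos hn, Int.emod_add_emod]
    congr 1
    ring
  have h2 : (s.map (fun i => PySem.Int.mod (-i - L) n)).map (fun x => PySem.Int.mod x n)
      = s.map (fun i => PySem.Int.mod (-i - L) n) := by
    rw [List.map_map]
    apply List.map_congr_left
    intro i _
    exact pv_modmod n _ hn
  rw [h1, pvRot_sorted n r hn hr hrn, h2]

-- both key lists coincide rotation by rotation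
theorem pv_keys_eq (n : Int) (hn : 0 < n) (s2 s3 : List Int) :
    (PySem.List.pyRange 0 n 1).foldl (fun acc rotation =>
      ([false, true]).foldl (fun acc2 reflected =>
        acc2 ++ [(PySem.List.sorted (s2.map
                    (fun index => transform_base_index n index 2 rotation reflected)) (fun x => x) false,
                  PySem.List.sorted (s3.map
                    (fun index => transform_base_index n index 3 rotation reflected)) (fun x => x) false)]) acc) [] =
    (PySem.List.pyRange 0 n 1).foldl (fun acc r =>
      acc ++ [(pvRot n r (PySem.List.sorted (s2.map (fun x => PySem.Int.mod x n)) (fun x => x) false),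
               pvRot n r (PySem.List.sorted (s3.map (fun x => PySem.Int.mod x n)) (fun x => x) false)),
              (pvRot n r (PySem.List.sorted (s2.map (fun x => PySem.Int.mod (-x - 2) n)) (fun x => x) false),
               pvRot n r (PySem.List.sorted (s3.map (fun x => PySem.Int.mod (-x - 3) n)) (fun x => x) false))]) [] := by
  have hA : (PySem.List.pyRange 0 n 1).foldl (fun acc rotation =>
      ([false, true]).foldl (fun acc2 reflected =>
        acc2 ++ [(PySem.List.sorted (s2.map
                    (fun index => transform_base_index n index 2 rotation reflected)) (fun x => x) false,
                  PySem.List.sorted (s3.map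
                    (fun index => transform_base_index n index 3 rotation reflected)) (fun x => x) false)]) acc) []
      = (PySem.List.pyRange 0 n 1).foldl (fun acc rotation =>
          acc ++ [(PySem.List.sorted (s2.map
                      (fun index => transform_base_index n index 2 rotation false)) (fun x => x) false,
                   PySem.List.sorted (s3.map
                      (fun index => transform_base_index n index 3 rotation false)) (fun x => x) false),
                  (PySem.List.sorted (s2.map
                      (fun index => transform_base_index n index 2 rotation true)) (fun x => x) false,
                   PySem.List.sorted (s3.map
                      (fun index => transform_base_index n index 3 rotation true)) (fun x => x) false)]) [] := by
    apply PySem.List.foldl_congr_mem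
    intro acc x _
    simp [List.foldl, List.append_assoc]
  rw [hA, PySem.List.foldl_append_eq_flatMap, PySem.List.foldl_append_eq_flatMap,
    List.nil_append, List.nil_append]
  apply List.flatMap_congr
  intro r hr
  have hm := PySem.List.mem_pyRange_one.mp hr
  simp only [transform_base_index, Bool.false_eq_true, if_false, if_true]
  rw [pvRot_sorted n r hn hm.1 hm.2 s2, pvRot_sorted n r hn hm.1 hm.2 s3,
    pvRefl_sorted n r 2 hn hm.1 hm.2 s2, pvRefl_sorted n r 3 hn hm.1 hm.2 s3]

-- ===== VERDICT (by name: the statement is the Claim_ definition above) =====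
theorem canonical_deficit_placement_spec : Claim_equal_canonical_deficit_placement := by
  intro n s2 s3 _ hpre
  have hn : (0:Int) < n := by
    unfold Pre_canonical_deficit_placement at hpre
    omega
  unfold Spec_canonical_deficit_placement
  simp only [canonical_deficit_placement, canonical_deficit_placement_alt]
  rw [pv_keys_eq n hn s2 s3]
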